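-- pv_equiv track=rewrite | github.com/ChrisPaladino/PythonRPGUtilities | RPG_Generator/src/logic.py | process_results
-- ===== SOURCE A (Python) =====
-- def process_results(action_dice, danger_dice):
--     cancelled_dice = []
--     action_dice.sort(reverse=True)
--     danger_dice.sort(reverse=True)
--     remaining_action_dice = action_dice.copy()
--     for danger_die in danger_dice:
--         if danger_die in remaining_action_dice:
--             remaining_action_dice.remove(danger_die)
--             cancelled_dice.append(danger_die)
--     return action_dice, danger_dice, cancelled_dice, remaining_action_dice
-- ===== SOURCE B (Python) =====
-- def process_results(action_dice, danger_dice):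
--     # Two-pointer merge over the two descending-sorted lists instead of
--     # repeated membership tests and remove() scans.
--     action_dice.sort(reverse=True)
--     danger_dice.sort(reverse=True)
--     cancelled_dice = []
--     remaining_action_dice = []
--     i = j = 0
--     while i < len(action_dice) and j < len(danger_dice):
--         a, d = action_dice[i], danger_dice[j]
--         if a == d:
--             cancelled_dice.append(d)
--             i += 1
--             j += 1
--         elif a > d:
--             remaining_action_dice.append(a)
--             i += 1
--         else:
--             j += 1
--     remaining_action_dice.extend(action_dice[i:])
--     return action_dice, danger_dice, cancelled_dice, remaining_action_dice
-- ===== Notes on version B (the rewrite author's own statement) =====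
-- stated objective: faster
-- what changed: Replaces the per-danger-die membership test and remove() scan over the remaining list with a single two-pointer merge over the two descending-sorted lists.
import Mathlib
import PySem

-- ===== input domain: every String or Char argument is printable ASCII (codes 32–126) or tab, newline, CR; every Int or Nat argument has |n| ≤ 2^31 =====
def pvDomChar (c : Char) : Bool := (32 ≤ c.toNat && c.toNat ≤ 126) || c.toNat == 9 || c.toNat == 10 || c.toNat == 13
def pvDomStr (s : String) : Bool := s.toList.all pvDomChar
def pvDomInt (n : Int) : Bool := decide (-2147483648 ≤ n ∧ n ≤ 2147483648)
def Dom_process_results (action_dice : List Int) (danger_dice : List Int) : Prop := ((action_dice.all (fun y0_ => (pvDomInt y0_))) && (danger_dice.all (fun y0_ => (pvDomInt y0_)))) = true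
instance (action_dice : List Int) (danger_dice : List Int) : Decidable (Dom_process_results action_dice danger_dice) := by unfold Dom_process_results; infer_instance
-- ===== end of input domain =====

-- B replaces A's per-danger-die membership/remove() scans with a two-pointer merge over the
-- two descending-sorted lists (asymptotically faster). Note: the Python functions sort both
-- argument lists in place; the equivalence proved here is about the return value.

-- ===== PORT A =====
-- A's loop body: if danger_die in remaining: remaining.remove(danger_die); cancelled.append(danger_die)
def prLoopA (st : List Int × List Int) (d : Int) : List Int × List Int :=
  if st.1.contains d then ((PySem.List.remove? st.1 d).getD st.1, st.2 ++ [d]) else st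

def process_results (action_dice : List Int) (danger_dice : List Int) : List Int × List Int × List Int × List Int :=
  let a := PySem.List.sorted action_dice (fun x => x) true
  let d := PySem.List.sorted danger_dice (fun x => x) true
  let st := d.foldl prLoopA (a, [])
  (a, d, st.2, st.1)

-- ===== PORT B =====
-- B's while loop: two pointers over the sorted lists, accumulating cancelled and remaining;
-- the fall-through case is the final `remaining.extend(action_dice[i:])`.
def prMergeLoop : List Int → List Int → List Int → List Int → List Int × List Int
  | x :: a, y :: d, canc, rem =>
    if x = y then prMergeLoop a d (canc ++ [y]) rem
    else if x > y then prMergeLoop a (y :: d) canc (rem ++ [x])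
    else prMergeLoop (x :: a) d canc rem
  | a, _, canc, rem => (canc, rem ++ a)
termination_by a d _ _ => a.length + d.length

def process_results_alt (action_dice : List Int) (danger_dice : List Int) : List Int × List Int × List Int × List Int :=
  let a := PySem.List.sorted action_dice (fun x => x) true
  let d := PySem.List.sorted danger_dice (fun x => x) true
  let st := prMergeLoop a d [] []
  (a, d, st.1, st.2)

-- ===== PRECONDITION & SPEC =====
def Spec_process_results (action_dice : List Int) (danger_dice : List Int) (out : List Int × List Int × List Int × List Int) : Prop := out = process_results_alt action_dice danger_dice
instance (action_dice : List Int) (danger_dice : List Int) (out : List Int × List Int × List Int × List Int) : Decidable (Spec_process_results action_dice danger_dice out) := by unfold Spec_process_results; infer_instance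

-- ===== CLAIM (what is proved, stated in full; the proofs are below) =====
def Claim_equal_process_results : Prop := ∀ (action_dice : List Int) (danger_dice : List Int), Dom_process_results action_dice danger_dice → Spec_process_results action_dice danger_dice (process_results action_dice danger_dice)

-- ===== LEMMAS AND PROOFS =====

-- A's fold on an empty remaining list never changes the state.
theorem foldA_nil (ds : List Int) (c : List Int) :
    ds.foldl prLoopA ([], c) = ([], c) := by
  induction ds with
  | nil => rfl
  | cons y ds ih => simpa [prLoopA] using ih

-- the cancelled accumulator of A's fold factors out
theorem foldA_acc (ds : List Int) (r c : List Int) :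
    ds.foldl prLoopA (r, c) = ((ds.foldl prLoopA (r, [])).1, c ++ (ds.foldl prLoopA (r, [])).2) := by
  induction ds generalizing r c with
  | nil => simp
  | cons y ds ih =>
    by_cases h : r.contains y
    · rw [List.foldl_cons, List.foldl_cons, prLoopA, prLoopA]
      simp only [h, if_pos]
      rw [ih _ (c ++ [y]), ih _ ([] ++ [y])]
      simp
    · rw [List.foldl_cons, List.foldl_cons, prLoopA, prLoopA]
      simp only [h, if_neg, Bool.false_eq_true, not_false_iff]
      exact ih _ _

-- a head strictly greater than every danger die survives A's fold untouched
theorem foldA_head_big (ds : List Int) (x : Int) (r c : List Int)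
    (h : ∀ y ∈ ds, y < x) :
    ds.foldl prLoopA (x :: r, c) = (x :: (ds.foldl prLoopA (r, c)).1, (ds.foldl prLoopA (r, c)).2) := by
  induction ds generalizing r c with
  | nil => rfl
  | cons y ds ih =>
    have hyx : y ≠ x := by have := h y (by simp); omega
    have hmem : (x :: r).contains y = r.contains y := by
      simp [hyx]
    by_cases hm : r.contains y
    · have hy : y ∈ r := by simpa using hm
      have h1 : PySem.List.remove? (x :: r) y = some ((x :: r).erase y) :=
        PySem.List.remove?_eq_some_erase (x :: r) y (by simp [hy])
      have h2 : PySem.List.remove? r y = some (r.erase y) :=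
        PySem.List.remove?_eq_some_erase r y hy
      have h3 : (x :: r).erase y = x :: r.erase y := by
        rw [List.erase_cons, if_neg (by simpa using Ne.symm hyx)]
      rw [List.foldl_cons, List.foldl_cons, prLoopA, prLoopA]
      simp only [hmem, hm, if_pos, h1, h2, Option.getD_some, h3]
      exact ih _ _ (fun z hz => h z (by simp [hz]))
    · rw [List.foldl_cons, List.foldl_cons, prLoopA, prLoopA]
      simp only [hmem, hm, if_neg, Bool.false_eq_true, not_false_iff]
      exact ih _ _ (fun z hz => h z (by simp [hz]))

-- the two accumulators of B's merge loop factor out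
theorem merge_acc_aux : ∀ n (a d : List Int), a.length + d.length ≤ n → ∀ (c r : List Int),
    prMergeLoop a d c r = (c ++ (prMergeLoop a d [] []).1, r ++ (prMergeLoop a d [] []).2) := by
  intro n
  induction n with
  | zero =>
    intro a d hlen c r
    have ha : a = [] := by cases a <;> simp_all
    subst ha; simp [prMergeLoop]
  | succ n ih =>
    intro a d hlen c r
    cases a with
    | nil => simp [prMergeLoop]
    | cons x a' =>
      cases d with
      | nil => simp [prMergeLoop]
      | cons y d' =>
        rcases lt_trichotomy x y with hxy | hxy | hxy
        · rw [prMergeLoop, if_neg (by omega), if_neg (by omega),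
              prMergeLoop, if_neg (by omega), if_neg (by omega)]
          exact ih (x :: a') d' (by simp at hlen ⊢; omega) c r
        · subst hxy
          rw [prMergeLoop, if_pos rfl, prMergeLoop, if_pos rfl]
          rw [ih a' d' (by simp at hlen ⊢; omega) (c ++ [x]) r,
              ih a' d' (by simp at hlen ⊢; omega) ([] ++ [x]) []]
          simp
        · rw [prMergeLoop, if_neg (by omega), if_pos (by omega),
              prMergeLoop, if_neg (by omega), if_pos (by omega)]
          rw [ih a' (y :: d') (by simp at hlen ⊢; omega) c (r ++ [x]),
              ih a' (y :: d') (by simp at hlen ⊢; omega) [] ([] ++ [x])]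
          simp

theorem merge_acc (a d : List Int) (c r : List Int) :
    prMergeLoop a d c r = (c ++ (prMergeLoop a d [] []).1, r ++ (prMergeLoop a d [] []).2) :=
  merge_acc_aux (a.length + d.length) a d le_rfl c r

-- main correspondence: on descending-sorted lists, A's fold computes B's merge
theorem main_lemma : ∀ n (a d : List Int), a.length + d.length ≤ n →
    a.Pairwise (fun p q => q ≤ p) → d.Pairwise (fun p q => q ≤ p) →
    d.foldl prLoopA (a, []) = ((prMergeLoop a d [] []).2, (prMergeLoop a d [] []).1) := by
  intro n
  induction n with
  | zero =>
    intro a d hlen _ _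
    have ha : a = [] := by cases a <;> simp_all
    have hd : d = [] := by cases d <;> simp_all
    subst ha; subst hd; simp [prMergeLoop]
  | succ n ih =>
    intro a d hlen hpa hpd
    cases d with
    | nil => cases a <;> simp [prMergeLoop]
    | cons y d' =>
      cases a with
      | nil => rw [foldA_nil]; simp [prMergeLoop]
      | cons x a' =>
        have hlen' : a'.length + d'.length ≤ n := by simp at hlen; omega
        have hpa' := (List.pairwise_cons.mp hpa).2
        have hpd' := (List.pairwise_cons.mp hpd).2
        rcases lt_trichotomy x y with hxy | hxy | hxy
        · -- x < y: y not in x :: a', skip this danger die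
          have hnot : ((x :: a').contains y) = false := by
            simp only [List.contains_eq_mem, decide_eq_false_iff_not, List.mem_cons]
            rintro (h | h)
            · omega
            · have := (List.pairwise_cons.mp hpa).1 y h; omega
          rw [List.foldl_cons, prLoopA]
          simp only [hnot, Bool.false_eq_true, if_neg, not_false_iff]
          rw [prMergeLoop, if_neg (by omega), if_neg (by omega)]
          exact ih (x :: a') d' (by simp at hlen ⊢; omega) hpa hpd'
        · -- x = y: cancel
          subst hxy
          have hc : ((x :: a').contains x) = true := by simp
          rw [List.foldl_cons, prLoopA]
          simp only [hc, if_pos]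
          rw [PySem.List.remove?_cons_self]
          simp only [Option.getD_some, List.nil_append]
          rw [prMergeLoop, if_pos rfl]
          rw [foldA_acc, merge_acc a' d' ([] ++ [x]) []]
          rw [ih a' d' hlen' hpa' hpd']
          simp
        · -- x > y: x survives to remaining
          have hall : ∀ z ∈ y :: d', z < x := by
            intro z hz
            rcases List.mem_cons.mp hz with h | h
            · omega
            · have := (List.pairwise_cons.mp hpd).1 z h; omega
          rw [foldA_head_big _ _ _ _ hall]
          rw [prMergeLoop, if_neg (by omega), if_pos (by omega)]
          rw [merge_acc a' (y :: d') [] ([] ++ [x])]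
          rw [ih a' (y :: d') (by simp at hlen ⊢; omega) hpa' hpd]
          simp

-- ===== VERDICT (by name: the statement is the Claim_ definition above) =====
theorem process_results_spec : Claim_equal_process_results := by
  intro action_dice danger_dice _
  unfold Spec_process_results process_results process_results_alt
  simp only
  rw [main_lemma ((PySem.List.sorted action_dice (fun x => x) true).length +
        (PySem.List.sorted danger_dice (fun x => x) true).length) _ _ le_rfl
      (PySem.List.sorted_pairwise_rev ..) (PySem.List.sorted_pairwise_rev ..)]
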